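-- pv_equiv track=rewrite | github.com/ethanhjennings/ledmatrix-pi-clock | utils/gen_font.py | parse_font
-- ===== SOURCE A (Python) =====
-- import math
--
-- def pixels_to_hex(pixels, width):
--     pixels = pixels.strip()
--     pixel_bin = 0
--     for p in pixels:
--         pixel_bin <<= 1
--         if p == '#':
--            pixel_bin += 1
--
--     byte_width = int(math.ceil(width / 8))
--     pixel_bin <<= (byte_width*8-len(pixels))
--     return hex(pixel_bin)[2:]
--
-- def parse_char(char, char_data):
--     bdf_data = ""
--     width = max(len(l.strip()) for l in char_data)
--     height = len(char_data)
--     codepoint = ord(char)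
--     dwidth = width + 1
--     bdf_data += "\n"
--     bdf_data += f"STARTCHAR {char}\n"
--     bdf_data += f"ENCODING {codepoint}\n"
--     bdf_data += f"SWIDTH 500 0\n"
--     bdf_data += f"DWIDTH {dwidth} 0\n"
--     bdf_data += f"BBX {width} {height} 0 0\n"
--     bdf_data += "BITMAP\n"
--
--     for line in char_data:
--        bdf_data += pixels_to_hex(line, width) + '\n'
--
--     bdf_data += "ENDCHAR\n"
--
--     return bdf_data, width, height
--
-- def gen_header(name, width, height, num_chars):
--     bdf_file =  f"STARTFONT 2.1\n"
--     bdf_file += f"FONT {name}\n"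
--     bdf_file += f"SIZE {width} {height} 75 75\n"
--     bdf_file += f"FONTBOUNDINGBOX {width} {height} 0 0\n"
--     bdf_file += f"STARTPROPERTIES 2\n"
--     bdf_file += f"FONT_ASCENT {height}\n"
--     bdf_file += f"FONT_DESCENT 0\n"
--     bdf_file += f"ENDPROPERTIES\n"
--     bdf_file += f"CHARS {num_chars}\n"
--     return bdf_file
--
-- def parse_font(name, font_data):
--     char = None
--     char_data = []
--     max_width = 0
--     max_height = 0
--     bdf_file = ""
--     char_count = 1
--
--     for line in font_data:
--         if len(line.strip()) == 0:
--             # Ignore empty lines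
--             continue
--         elif line.startswith('='):
--             # Start new character
--             if char is not None:
--                 new_char, width, height = parse_char(char, char_data)
--                 bdf_file += new_char
--                 max_width = max(width, max_width)
--                 max_height = max(height, max_height)
--                 char_count += 1
--             char = line[1]
--             char_data = []
--         else:
--             char_data.append(line)
--     new_char, width, height = parse_char(char, char_data)
--     bdf_file += new_char
--     max_width = max(width, max_width)
--     max_height = max(height, max_height)
--
--     bdf_file = gen_header(name, max_width, max_height, char_count) + bdf_file
--     bdf_file += "\nENDFONT"
--
--     return bdf_file
-- ===== SOURCE B (Python) =====
-- import math
--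
-- def pixels_to_hex(pixels, width):
--     pixels = pixels.strip()
--     pixel_bin = 0
--     for p in pixels:
--         pixel_bin <<= 1
--         if p == '#':
--            pixel_bin += 1
--
--     byte_width = int(math.ceil(width / 8))
--     pixel_bin <<= (byte_width*8-len(pixels))
--     return hex(pixel_bin)[2:]
--
-- def parse_char(char, char_data):
--     bdf_data = ""
--     width = max(len(l.strip()) for l in char_data)
--     height = len(char_data)
--     codepoint = ord(char)
--     dwidth = width + 1
--     bdf_data += "\n"
--     bdf_data += f"STARTCHAR {char}\n"
--     bdf_data += f"ENCODING {codepoint}\n"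
--     bdf_data += f"SWIDTH 500 0\n"
--     bdf_data += f"DWIDTH {dwidth} 0\n"
--     bdf_data += f"BBX {width} {height} 0 0\n"
--     bdf_data += "BITMAP\n"
--
--     for line in char_data:
--        bdf_data += pixels_to_hex(line, width) + '\n'
--
--     bdf_data += "ENDCHAR\n"
--
--     return bdf_data, width, height
--
-- def gen_header(name, width, height, num_chars):
--     bdf_file =  f"STARTFONT 2.1\n"
--     bdf_file += f"FONT {name}\n"
--     bdf_file += f"SIZE {width} {height} 75 75\n"
--     bdf_file += f"FONTBOUNDINGBOX {width} {height} 0 0\n"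
--     bdf_file += f"STARTPROPERTIES 2\n"
--     bdf_file += f"FONT_ASCENT {height}\n"
--     bdf_file += f"FONT_DESCENT 0\n"
--     bdf_file += f"ENDPROPERTIES\n"
--     bdf_file += f"CHARS {num_chars}\n"
--     return bdf_file
--
-- def parse_font(name, font_data):
--     # Phase 1: group the lines into (char, lines) blocks, one per '=' marker line.
--     groups = []
--     pending = None
--     for line in font_data:
--         if not line.strip():
--             continue
--         if line.startswith('='):
--             if pending is not None:
--                 groups.append(pending)
--             pending = (line[1], [])
--         elif pending is not None:
--             pending[1].append(line)
--     if pending is not None: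
--         groups.append(pending)
--     # Phase 2: render every block, then aggregate.
--     parsed = [parse_char(c, lines) for c, lines in groups]
--     body = ''.join(frag for frag, _, _ in parsed)
--     max_width = max(w for _, w, _ in parsed)
--     max_height = max(h for _, _, h in parsed)
--     return gen_header(name, max_width, max_height, len(groups)) + body + '\nENDFONT'
-- ===== Notes on version B (the rewrite author's own statement) =====
-- stated objective: simpler
-- what changed: A interleaves grouping, rendering and aggregation in one stateful loop with a duplicated flush after it; B first groups the lines into (char, lines) blocks, then renders each block with parse_char once and aggregates width/height/count/body over the block list, so the flush logic appears only once.
import Mathlib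
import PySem

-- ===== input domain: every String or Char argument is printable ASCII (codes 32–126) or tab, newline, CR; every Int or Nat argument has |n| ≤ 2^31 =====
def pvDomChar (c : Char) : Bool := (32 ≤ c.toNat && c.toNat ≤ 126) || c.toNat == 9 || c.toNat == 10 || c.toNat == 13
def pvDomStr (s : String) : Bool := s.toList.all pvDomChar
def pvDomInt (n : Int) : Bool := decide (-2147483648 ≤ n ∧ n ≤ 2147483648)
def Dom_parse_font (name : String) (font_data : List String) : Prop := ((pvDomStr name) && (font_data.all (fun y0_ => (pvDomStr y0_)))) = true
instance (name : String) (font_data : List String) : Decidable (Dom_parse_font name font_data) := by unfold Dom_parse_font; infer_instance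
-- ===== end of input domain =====

-- B is a two-phase re-decomposition of A (group the lines first, then render and aggregate);
-- the per-character helpers pixels_to_hex / parse_char / gen_header are identical in both
-- Python versions and are therefore defined once here and shared by the two ports.

-- str(n) for a Nat-valued Python int
def natStr (n : Nat) : String := PySem.Int.toStr (Int.ofNat n)

-- hex(n)[2:] for n ≥ 0 (lowercase hex digits, "0" for 0)
def hexStr (n : Nat) : String := String.ofList (Nat.toDigits 16 n)

def pixels_to_hex (pixels : String) (width : Nat) : String :=
  let p := (PySem.Str.strip pixels).toList
  let pixel_bin := p.foldl (fun acc c => acc * 2 + (if c = '#' then 1 else 0)) 0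
  let byte_width := (width + 7) / 8   -- = int(math.ceil(width / 8)) for 0 ≤ width
  -- the shift byte_width*8 - len(p) is never negative on the calls parse_char makes
  hexStr (pixel_bin <<< (byte_width * 8 - p.length))

def parse_char (char : Char) (char_data : List String) : String × Nat × Nat :=
  -- Python's max() raises ValueError on an empty char_data; Pre_ excludes empty blocks
  let width := (char_data.map (fun l => (PySem.Str.strip l).toList.length)).foldl max 0
  let height := char_data.length
  let codepoint := char.toNat
  let dwidth := width + 1
  let bitmap := char_data.foldl (fun acc l => acc ++ pixels_to_hex l width ++ "\n") ""
  ("\n" ++ "STARTCHAR " ++ String.singleton char ++ "\n" ++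
   "ENCODING " ++ natStr codepoint ++ "\n" ++
   "SWIDTH 500 0\n" ++
   "DWIDTH " ++ natStr dwidth ++ " 0\n" ++
   "BBX " ++ natStr width ++ " " ++ natStr height ++ " 0 0\n" ++
   "BITMAP\n" ++ bitmap ++ "ENDCHAR\n",
   width, height)

def gen_header (name : String) (width height num_chars : Nat) : String :=
  "STARTFONT 2.1\n" ++
  "FONT " ++ name ++ "\n" ++
  "SIZE " ++ natStr width ++ " " ++ natStr height ++ " 75 75\n" ++
  "FONTBOUNDINGBOX " ++ natStr width ++ " " ++ natStr height ++ " 0 0\n" ++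
  "STARTPROPERTIES 2\n" ++
  "FONT_ASCENT " ++ natStr height ++ "\n" ++
  "FONT_DESCENT 0\n" ++
  "ENDPROPERTIES\n" ++
  "CHARS " ++ natStr num_chars ++ "\n"

-- ===== PORT A =====
-- A's loop body; state = (char, char_data, max_width, max_height, bdf_file, char_count)
def parseFontStepA (st : Option Char × List String × Nat × Nat × String × Nat) (line : String) :
    Option Char × List String × Nat × Nat × String × Nat :=
  let (char, cd, mw, mh, bdf, cnt) := st
  if (PySem.Str.strip line).toList.length = 0 then st
  else if PySem.Str.startswith line "=" then
    match char with
    | some c =>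
        let r := parse_char c cd
        -- line[1]: IndexError on a one-character "=" line is excluded by Pre_
        (some ((PySem.Str.pyGet? line 1).getD ' '), [], max r.2.1 mw, max r.2.2 mh, bdf ++ r.1, cnt + 1)
    | none => (some ((PySem.Str.pyGet? line 1).getD ' '), [], mw, mh, bdf, cnt)
  else (char, cd ++ [line], mw, mh, bdf, cnt)

def parse_font (name : String) (font_data : List String) : String :=
  match List.foldl parseFontStepA (none, [], 0, 0, "", 1) font_data with
  | (char, cd, mw, mh, bdf, cnt) =>
    -- char = none here is Python's TypeError/ValueError on the final parse_char; excluded by Pre_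
    let r := parse_char (char.getD ' ') cd
    gen_header name (max r.2.1 mw) (max r.2.2 mh) cnt ++ (bdf ++ r.1) ++ "\nENDFONT"

-- ===== PORT B =====
-- phase 1 loop body; state = (finished groups, pending group)
def parseFontStepB (st : List (Char × List String) × Option (Char × List String)) (line : String) :
    List (Char × List String) × Option (Char × List String) :=
  let (gs, pend) := st
  if (PySem.Str.strip line).toList.length = 0 then st
  else if PySem.Str.startswith line "=" then
    (match pend with | some g => gs ++ [g] | none => gs,
     some ((PySem.Str.pyGet? line 1).getD ' ', []))
  else
    match pend with
    | some g => (gs, some (g.1, g.2 ++ [line]))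
    | none => st

def parse_font_alt (name : String) (font_data : List String) : String :=
  let st := List.foldl parseFontStepB ([], none) font_data
  let groups := match st.2 with | some g => st.1 ++ [g] | none => st.1
  let parsed := groups.map (fun g => parse_char g.1 g.2)
  let body := String.join (parsed.map (·.1))
  let mw := (parsed.map (·.2.1)).foldl max 0
  let mh := (parsed.map (·.2.2)).foldl max 0
  gen_header name mw mh groups.length ++ body ++ "\nENDFONT"

-- ===== PRECONDITION & SPEC =====
def isEqLine (l : String) : Bool := PySem.Str.startswith l "="
def sigLines (fd : List String) : List String :=
  fd.filter (fun l => (PySem.Str.strip l).toList.length ≠ 0)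

-- Pre_ = exactly the inputs where Python A returns: at least one significant '='-marker line
-- (else the final parse_char raises on char = None), every '='-line has a character after the
-- '=' (else line[1] is an IndexError), and every marker block is non-empty, i.e. no marker is
-- immediately followed by another marker and the last significant line is not a marker
-- (else parse_char's max() over an empty block raises ValueError).
def Pre_parse_font (name : String) (font_data : List String) : Prop :=
  (∃ l ∈ font_data, (PySem.Str.strip l).toList.length ≠ 0 ∧ isEqLine l = true) ∧
  (∀ l ∈ font_data, isEqLine l = true → 2 ≤ l.toList.length) ∧
  (∀ p ∈ (sigLines font_data).zip (sigLines font_data).tail, ¬(isEqLine p.1 = true ∧ isEqLine p.2 = true)) ∧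
  ((sigLines font_data).getLast?.all (fun l => !isEqLine l)) = true
instance (name : String) (font_data : List String) : Decidable (Pre_parse_font name font_data) := by
  unfold Pre_parse_font; infer_instance

def pvWitness_parse_font : String × List String := ("myfont", ["=A", "#.", "##"])

def Spec_parse_font (name : String) (font_data : List String) (out : String) : Prop :=
  out = parse_font_alt name font_data
instance (name : String) (font_data : List String) (out : String) : Decidable (Spec_parse_font name font_data out) := by
  unfold Spec_parse_font; infer_instance

-- ===== CLAIM (what is proved, stated in full; the proofs are below) =====
def Claim_equal_parse_font : Prop := ∀ (name : String) (font_data : List String), Dom_parse_font name font_data → Pre_parse_font name font_data → Spec_parse_font name font_data (parse_font name font_data)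

-- ===== LEMMAS AND PROOFS =====

-- the three per-group aggregates
def gFrag (g : Char × List String) : String := (parse_char g.1 g.2).1
def gW (g : Char × List String) : Nat := (parse_char g.1 g.2).2.1
def gH (g : Char × List String) : Nat := (parse_char g.1 g.2).2.2

-- the simulation relation between A's loop state and B's phase-1 state
def RelAB (stA : Option Char × List String × Nat × Nat × String × Nat)
    (stB : List (Char × List String) × Option (Char × List String)) : Prop :=
  (∀ g, stB.2 = some g → stA.1 = some g.1 ∧ stA.2.1 = g.2) ∧
  (stA.1 = none ↔ stB.2 = none) ∧
  stA.2.2.1 = ((stB.1.map gW).foldl max 0) ∧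
  stA.2.2.2.1 = ((stB.1.map gH).foldl max 0) ∧
  stA.2.2.2.2.1 = String.join (stB.1.map gFrag) ∧
  stA.2.2.2.2.2 = stB.1.length + 1

lemma join_concat (l : List String) (s : String) :
    String.join (l ++ [s]) = String.join l ++ s := by
  simp [String.join]

lemma step_rel (line : String) (stA : Option Char × List String × Nat × Nat × String × Nat)
    (stB : List (Char × List String) × Option (Char × List String)) (h : RelAB stA stB) :
    RelAB (parseFontStepA stA line) (parseFontStepB stB line) := by
  obtain ⟨char, cd, mw, mh, bdf, cnt⟩ := stA
  obtain ⟨gs, pend⟩ := stB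
  obtain ⟨hpend, hnone, hmw, hmh, hbdf, hcnt⟩ := h
  simp only [RelAB] at *
  unfold parseFontStepA parseFontStepB
  split_ifs with h1 h2
  · exact ⟨hpend, hnone, hmw, hmh, hbdf, hcnt⟩
  · -- marker line: flush pending / current char
    cases pend with
    | none =>
        have hc : char = none := hnone.mpr rfl
        subst hc
        simp_all
    | some g =>
        obtain ⟨hc, hcd⟩ := hpend g rfl
        subst hc hcd
        simp_all [join_concat, gW, gH, gFrag]
        exact ⟨Nat.max_comm _ _, Nat.max_comm _ _⟩
  · -- data line
    cases pend with
    | none =>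
        have hc : char = none := hnone.mpr rfl
        subst hc
        simp_all
    | some g =>
        obtain ⟨hc, hcd⟩ := hpend g rfl
        subst hc hcd
        simp_all

lemma fold_rel (fd : List String) (stA : Option Char × List String × Nat × Nat × String × Nat)
    (stB : List (Char × List String) × Option (Char × List String)) (h : RelAB stA stB) :
    RelAB (List.foldl parseFontStepA stA fd) (List.foldl parseFontStepB stB fd) := by
  induction fd generalizing stA stB with
  | nil => exact h
  | cons l fd ih =>
      simp only [List.foldl_cons]
      exact ih _ _ (step_rel l _ _ h)

-- A's char component, once set by a marker line, never returns to none
lemma stepA_some (line : String) (st : Option Char × List String × Nat × Nat × String × Nat)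
    (h : st.1 ≠ none) : (parseFontStepA st line).1 ≠ none := by
  obtain ⟨char, cd, mw, mh, bdf, cnt⟩ := st
  unfold parseFontStepA
  split_ifs
  · exact h
  · cases char <;> simp_all
  · simpa using h

-- once a significant marker line has been seen, A's char is (and stays) some
lemma char_some (fd : List String) :
    ∀ (st : Option Char × List String × Nat × Nat × String × Nat),
    (st.1 ≠ none ∨ ∃ l ∈ fd, (PySem.Str.strip l).toList.length ≠ 0 ∧ isEqLine l = true) →
    (List.foldl parseFontStepA st fd).1 ≠ none := by
  induction fd with
  | nil =>
      intro st h
      rcases h with h | ⟨l, hl, _⟩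
      · exact h
      · cases hl
  | cons l fd ih =>
      intro st h
      simp only [List.foldl_cons]
      apply ih
      rcases h with h | ⟨l', hl', hs, he⟩
      · exact Or.inl (stepA_some l st h)
      · rcases List.mem_cons.mp hl' with rfl | hmem
        · left
          obtain ⟨char, cd, mw, mh, bdf, cnt⟩ := st
          unfold parseFontStepA isEqLine at *
          simp only [hs, he]
          cases char <;> simp
        · exact Or.inr ⟨l', hmem, hs, he⟩

-- ===== VERDICT (by name: the statement is the Claim_ definition above) =====
theorem parse_font_spec : Claim_equal_parse_font := by
  intro name fd _hdom hpre
  unfold Spec_parse_font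
  obtain ⟨⟨l0, hl0, hs0, he0⟩, -, -, -⟩ := hpre
  have hrel := fold_rel fd (none, [], 0, 0, "", 1) ([], none) (by simp [RelAB, String.join])
  have hsome := char_some fd (none, [], 0, 0, "", 1) (Or.inr ⟨l0, hl0, hs0, he0⟩)
  rcases hA : List.foldl parseFontStepA (none, [], 0, 0, "", 1) fd with ⟨char, cd, mw, mh, bdf, cnt⟩
  rcases hB : List.foldl parseFontStepB ([], none) fd with ⟨gs, pend⟩
  rw [hA] at hrel hsome
  rw [hB] at hrel
  obtain ⟨hpend, hnone, hmw, hmh, hbdf, hcnt⟩ := hrel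
  simp only at hsome hnone hmw hmh hbdf hcnt
  cases pend with
  | none => exact absurd (hnone.mpr rfl) hsome
  | some g =>
      obtain ⟨hc, hcd⟩ := hpend g rfl
      simp only at hc hcd
      unfold parse_font parse_font_alt
      rw [hA, hB]
      subst hc hcd hmw hmh hbdf hcnt
      have e1 : List.map ((fun x : String × ℕ × ℕ => x.2.1) ∘ fun g : Char × List String => parse_char g.1 g.2) gs = List.map gW gs := rfl
      have e2 : List.map ((fun x : String × ℕ × ℕ => x.2.2) ∘ fun g : Char × List String => parse_char g.1 g.2) gs = List.map gH gs := rfl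
      have e3 : List.map ((fun x : String × ℕ × ℕ => x.1) ∘ fun g : Char × List String => parse_char g.1 g.2) gs = List.map gFrag gs := rfl
      simp [join_concat, e1, e2, e3, Nat.max_comm]
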